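-- pv_equiv track=rewrite | github.com/guokedashuaige/cse160 | homework5/social_network.py | num_map_to_sorted_list
-- ===== SOURCE A (Python) =====
-- from operator import itemgetter
--
-- def num_map_to_sorted_list(map_with_number_vals):
--     """Given a dictionary, return a list of the keys in the dictionary.
--     The keys are sorted by the number value they map to, from greatest
--     number down to smallest number.
--     When two keys map to the same number value, the keys are sorted by their
--     natural sort order for whatever type the key is, from least to greatest.
--
--     Arguments:
--         map_with_number_vals: a dictionary whose values are numbers
--
--     Returns: a list of keys, sorted by the values in map_with_number_vals
--     """
--     # lambda is easy but we cannot use lambda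
--     #result = sorted(map_with_number_vals.keys(), key=lambda x: (-map_with_number_vals[x], x))
--
--    #create a list for itemgetter use revealed in https://courses.cs.washington.edu/courses/cse160/22au/lectures/13-sorting-22au.pdf
--     f = zip(map_with_number_vals.keys(), map_with_number_vals.values())
--     sorted_list_by_name = sorted(f, key=itemgetter(0),reverse=False)
--     sorted_list_by_num = sorted(sorted_list_by_name, key=itemgetter(1),reverse=True)
--     rst = []
--     for item in sorted_list_by_num:
--         rst.append(item[0])
--     return rst
-- ===== SOURCE B (Python) =====
-- def num_map_to_sorted_list(map_with_number_vals):
--     """Bucket the keys by their value, then emit the buckets in descending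
--     value order, each bucket's keys sorted ascending."""
--     buckets = {}
--     for key, val in map_with_number_vals.items():
--         buckets.setdefault(val, []).append(key)
--     result = []
--     for val in sorted(buckets, reverse=True):
--         result.extend(sorted(buckets[val]))
--     return result
-- ===== Notes on version B (the rewrite author's own statement) =====
-- stated objective: alternative
-- what changed: Replaced A's two stable whole-list sorts (by key ascending, then by value descending) plus an extraction loop with a group-by: one dict pass bucketing keys by value, then the distinct values sorted descending and each bucket's keys sorted ascending, concatenated.
import Mathlib
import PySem

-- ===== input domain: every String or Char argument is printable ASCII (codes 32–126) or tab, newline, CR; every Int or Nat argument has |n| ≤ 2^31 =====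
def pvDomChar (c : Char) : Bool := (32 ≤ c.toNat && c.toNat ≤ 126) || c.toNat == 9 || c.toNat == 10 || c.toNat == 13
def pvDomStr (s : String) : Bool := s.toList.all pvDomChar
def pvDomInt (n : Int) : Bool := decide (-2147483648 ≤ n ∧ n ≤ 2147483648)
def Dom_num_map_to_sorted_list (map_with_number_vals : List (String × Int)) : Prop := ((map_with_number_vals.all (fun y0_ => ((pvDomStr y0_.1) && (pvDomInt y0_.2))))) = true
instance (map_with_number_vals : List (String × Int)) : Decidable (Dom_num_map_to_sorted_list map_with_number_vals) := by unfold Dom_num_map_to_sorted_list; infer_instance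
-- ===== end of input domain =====

-- B replaces A's two whole-list sort passes by a group-by: one dict pass bucketing
-- the keys by value, the distinct values sorted descending, each bucket sorted
-- ascending; objective: alternative.

-- ===== PORT A =====
def num_map_to_sorted_list (map_with_number_vals : List (String × Int)) : List String :=
  -- f = zip(map_with_number_vals.keys(), map_with_number_vals.values())
  let f := List.zip (map_with_number_vals.map Prod.fst) (map_with_number_vals.map Prod.snd)
  -- sorted(f, key=itemgetter(0), reverse=False)
  let sorted_list_by_name := PySem.List.sorted f (fun item => item.1) false
  -- sorted(sorted_list_by_name, key=itemgetter(1), reverse=True)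
  let sorted_list_by_num := PySem.List.sorted sorted_list_by_name (fun item => item.2) true
  -- rst = []; for item in sorted_list_by_num: rst.append(item[0])
  sorted_list_by_num.foldl (fun rst item => rst ++ [item.1]) []

-- ===== PORT B =====
-- buckets.setdefault(val, []).append(key) updates buckets[val] in place to
-- buckets.get(val, []) + [key], i.e. Dict.modify; 'for val in sorted(buckets,
-- reverse=True): result.extend(sorted(buckets[val]))' is the second fold.
def num_map_to_sorted_list_alt (map_with_number_vals : List (String × Int)) : List String :=
  let buckets := map_with_number_vals.foldl
    (fun b kv => b.modify kv.2 ([] : List String) (fun l => l ++ [kv.1])) PySem.Dict.empty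
  (PySem.List.sorted buckets.keys (fun v => v) true).foldl
    (fun result v => result ++ PySem.List.sorted (buckets.getD v []) (fun k => k) false) []

-- ===== PRECONDITION & SPEC =====
def Spec_num_map_to_sorted_list (map_with_number_vals : List (String × Int)) (out : List String) : Prop := out = num_map_to_sorted_list_alt map_with_number_vals
instance (map_with_number_vals : List (String × Int)) (out : List String) : Decidable (Spec_num_map_to_sorted_list map_with_number_vals out) := by unfold Spec_num_map_to_sorted_list; infer_instance

-- ===== CLAIM (what is proved, stated in full; the proofs are below) =====
def Claim_equal_num_map_to_sorted_list : Prop := ∀ (map_with_number_vals : List (String × Int)), Dom_num_map_to_sorted_list map_with_number_vals → Spec_num_map_to_sorted_list map_with_number_vals (num_map_to_sorted_list map_with_number_vals)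

-- ===== LEMMAS AND PROOFS =====

-- The total order both programs sort into: value descending, then key ascending.
def pvR (a b : String × Int) : Prop := b.2 < a.2 ∨ (a.2 = b.2 ∧ a.1 ≤ b.1)

theorem pvR_trans {a b c : String × Int} (hab : pvR a b) (hbc : pvR b c) : pvR a c := by
  rcases hab with h | ⟨h1, h2⟩ <;> rcases hbc with g | ⟨g1, g2⟩
  · exact Or.inl (lt_trans g h)
  · exact Or.inl (g1 ▸ h)
  · exact Or.inl (h1 ▸ g)
  · exact Or.inr ⟨h1.trans g1, le_trans h2 g2⟩

theorem pvR_antisymm {a b : String × Int} (hab : pvR a b) (hba : pvR b a) : a = b := by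
  rcases hab with h | ⟨h1, h2⟩ <;> rcases hba with g | ⟨g1, g2⟩
  · exact absurd h (lt_asymm g)
  · exact absurd (g1 ▸ h) (lt_irrefl _)
  · exact absurd (h1 ▸ g) (lt_irrefl _)
  · exact Prod.ext (le_antisymm h2 g2) h1

theorem insertBy_pairwise_pvR (before : (String × Int) → (String × Int) → Bool)
    (x : String × Int) (ys : List (String × Int))
    (h1 : ∀ y, before x y = true → pvR x y)
    (h2 : ∀ y ∈ ys, before x y = false → pvR y x)
    (hys : ys.Pairwise pvR) : (PySem.List.insertBy before x ys).Pairwise pvR := by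
  induction ys with
  | nil => simp [PySem.List.insertBy]
  | cons y ys ih =>
    rw [List.pairwise_cons] at hys
    by_cases hb : before x y = true
    · show (if before x y = true then x :: y :: ys else _).Pairwise pvR
      rw [if_pos hb]
      refine List.pairwise_cons.2 ⟨?_, List.pairwise_cons.2 hys⟩
      intro z hz
      rcases List.mem_cons.1 hz with rfl | hz
      · exact h1 z hb
      · exact pvR_trans (h1 y hb) (hys.1 z hz)
    · show (if before x y = true then x :: y :: ys else y :: PySem.List.insertBy before x ys).Pairwise pvR
      rw [if_neg hb]
      refine List.pairwise_cons.2 ⟨?_, ?_⟩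
      · intro z hz
        rcases (PySem.List.insertBy_mem_iff before x z ys).1 hz with rfl | hz
        · exact h2 y List.mem_cons_self (Bool.not_eq_true _ ▸ hb)
        · exact hys.1 z hz
      · exact ih (fun z hz hf => h2 z (List.mem_cons_of_mem y hz) hf) hys.2

-- A's second (value-descending) stable sort of a key-ascending list is pvR-ordered.
theorem foldl_insertBy_pairwise_A :
    ∀ (l acc : List (String × Int)),
      l.Pairwise (fun a b => a.1 ≤ b.1) → acc.Pairwise pvR →
      (∀ y ∈ acc, ∀ x ∈ l, y.1 ≤ x.1) →
      (l.foldl (fun acc x => PySem.List.insertBy (fun a b => decide (b.2 < a.2)) x acc)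
        acc).Pairwise pvR := by
  intro l
  induction l with
  | nil => exact fun acc _ hacc _ => hacc
  | cons x t ih =>
    intro acc hl hacc hcross
    rw [List.pairwise_cons] at hl
    refine ih _ hl.2 (insertBy_pairwise_pvR _ x acc ?_ ?_ hacc) ?_
    · intro y hy
      exact Or.inl (of_decide_eq_true hy)
    · intro y hy hf
      rcases lt_or_eq_of_le (not_lt.1 (of_decide_eq_false hf)) with h | h
      · exact Or.inl h
      · exact Or.inr ⟨h.symm, hcross y hy x List.mem_cons_self⟩
    · intro y hy z hz
      rcases (PySem.List.insertBy_mem_iff _ x y acc).1 hy with rfl | hy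
      · exact hl.1 z hz
      · exact hcross y hy z (List.mem_cons_of_mem x hz)

theorem pv_zip_fst_snd {α β : Type} (d : List (α × β)) :
    List.zip (d.map Prod.fst) (d.map Prod.snd) = d := by
  induction d with
  | nil => rfl
  | cons p t ih => simp [List.zip]

-- B-side: the bucket of value v, in input order.
def pvGroup (d : List (String × Int)) (v : Int) : List String :=
  (d.filter (fun p => p.2 == v)).map (fun p => p.1)

-- the sorted distinct values, descending
def pvVs (d : List (String × Int)) : List Int :=
  PySem.List.sorted (PySem.Set.ofList (d.map (fun p => p.2))) (fun v => v) true

-- B's output, re-paired with the value each key came from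
def pvBpairs (d : List (String × Int)) : List (String × Int) :=
  (pvVs d).flatMap
    (fun v => (PySem.List.sorted (pvGroup d v) (fun k => k) false).map (fun k => (k, v)))

theorem pv_buckets_keys (d : List (String × Int)) :
    (d.foldl (fun b kv => b.modify kv.2 ([] : List String) (fun l => l ++ [kv.1]))
      PySem.Dict.empty).keys = PySem.Set.ofList (d.map (fun p => p.2)) := by
  rw [PySem.Dict.keys_foldl_modify_key d (fun kv => kv.2) [] (fun _ kv l => l ++ [kv.1])]
  rfl

theorem pv_buckets_getD (d : List (String × Int)) (v : Int) :
    (d.foldl (fun b kv => b.modify kv.2 ([] : List String) (fun l => l ++ [kv.1]))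
      PySem.Dict.empty).getD v [] = pvGroup d v := by
  have h : (d.foldl (fun b kv => b.modify kv.2 ([] : List String) (fun l => l ++ [kv.1]))
        PySem.Dict.empty)
      = (d.map Prod.swap).foldl
        (fun b p => b.modify p.1 ([] : List String) (fun l => l ++ [p.2])) PySem.Dict.empty := by
    rw [List.foldl_map]
    rfl
  rw [h, PySem.Dict.getD_foldl_modify_append, List.filter_map, List.map_map, PySem.Dict.getD_empty, List.nil_append]
  rfl

-- group-by over any duplicate-free cover of the values is a permutation of the input
theorem pv_groupby_perm : ∀ (S : List Int) (d : List (String × Int)), S.Nodup →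
    (∀ p ∈ d, p.2 ∈ S) →
    (S.flatMap (fun v => d.filter (fun p => p.2 == v))).Perm d := by
  intro S
  induction S with
  | nil =>
    intro d _ h
    cases d with
    | nil => simp
    | cons p t => exact absurd (h p List.mem_cons_self) (by simp)
  | cons v S ih =>
    intro d hnd hall
    rw [List.flatMap_cons]
    rw [List.nodup_cons] at hnd
    have hchunk : ∀ u ∈ S,
        d.filter (fun p => p.2 == u)
          = (d.filter (fun p => !(p.2 == v))).filter (fun p => p.2 == u) := by
      intro u hu
      rw [List.filter_filter]
      apply List.filter_congr
      intro p _
      have huv : u ≠ v := fun h => hnd.1 (h ▸ hu)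
      by_cases hp : p.2 = u
      · simp [hp, huv]
      · simp [hp]
    have hflat : S.flatMap (fun u => d.filter (fun p => p.2 == u))
        = S.flatMap (fun u => (d.filter (fun p => !(p.2 == v))).filter (fun p => p.2 == u)) := by
      rw [List.flatMap_def, List.flatMap_def, List.map_congr_left hchunk]
    have hrest : (S.flatMap (fun u =>
        (d.filter (fun p => !(p.2 == v))).filter (fun p => p.2 == u))).Perm
          (d.filter (fun p => !(p.2 == v))) := by
      refine ih _ hnd.2 ?_
      intro p hp
      rw [List.mem_filter] at hp
      have hne : p.2 ≠ v := by simpa using hp.2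
      rcases List.mem_cons.1 (hall p hp.1) with h | h
      · exact absurd h hne
      · exact h
    rw [hflat]
    exact (List.Perm.append_left _ hrest).trans (List.filter_append_perm _ d)

theorem pvBpairs_perm (d : List (String × Int)) : (pvBpairs d).Perm d := by
  have hchunk : ∀ v ∈ pvVs d,
      ((PySem.List.sorted (pvGroup d v) (fun k => k) false).map (fun k => (k, v))).Perm
        (d.filter (fun p => p.2 == v)) := by
    intro v _
    have h1 : ((PySem.List.sorted (pvGroup d v) (fun k => k) false).map
        (fun k => (k, v))).Perm ((pvGroup d v).map (fun k => (k, v))) :=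
      (PySem.List.sorted_perm _ _ _).map _
    have h2 : (pvGroup d v).map (fun k => (k, v)) = d.filter (fun p => p.2 == v) := by
      rw [pvGroup, List.map_map]
      have : ∀ p ∈ d.filter (fun p => p.2 == v),
          ((fun k => (k, v)) ∘ fun p : String × Int => p.1) p = id p := by
        intro p hp
        rw [List.mem_filter] at hp
        have : p.2 = v := by simpa using hp.2
        simp [Function.comp, ← this]
      rw [List.map_congr_left this, List.map_id]
    exact h2 ▸ h1
  have hperm1 : (pvBpairs d).Perm ((pvVs d).flatMap (fun v => d.filter (fun p => p.2 == v))) :=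
    List.Perm.flatMap_left _ hchunk
  have hperm2 : ((pvVs d).flatMap (fun v => d.filter (fun p => p.2 == v))).Perm
      ((PySem.Set.ofList (d.map (fun p => p.2))).flatMap (fun v => d.filter (fun p => p.2 == v))) :=
    (PySem.List.sorted_perm _ _ _).flatMap_right _
  refine (hperm1.trans hperm2).trans (pv_groupby_perm _ d (PySem.Set.nodup_ofList _) ?_)
  intro p hp
  exact (PySem.Set.mem_ofList _ _).2 (List.mem_map_of_mem hp)

theorem pvBpairs_pairwise (d : List (String × Int)) : (pvBpairs d).Pairwise pvR := by
  rw [pvBpairs, List.pairwise_flatMap]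
  constructor
  · intro v _
    rw [List.pairwise_map]
    exact (PySem.List.sorted_pairwise (pvGroup d v) (fun k => k)).imp
      (fun h => Or.inr ⟨rfl, h⟩)
  · have h1 : (pvVs d).Pairwise (fun a b => b ≤ a) :=
      PySem.List.sorted_pairwise_rev _ _
    have h2 : (pvVs d).Pairwise (fun a b => a ≠ b) :=
      ((PySem.List.sorted_perm _ _ _).nodup_iff).2 (PySem.Set.nodup_ofList _)
    refine (h1.and h2).imp ?_
    rintro a b ⟨hle, hne⟩ x hx y hy
    rcases List.mem_map.1 hx with ⟨k, _, rfl⟩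
    rcases List.mem_map.1 hy with ⟨k', _, rfl⟩
    exact Or.inl (lt_of_le_of_ne hle (Ne.symm hne))

-- the central fact: A's doubly-sorted pair list IS B's bucket concatenation
theorem pv_main (d : List (String × Int)) :
    PySem.List.sorted (PySem.List.sorted d (fun item => item.1) false)
      (fun item => item.2) true = pvBpairs d := by
  have hA : (PySem.List.sorted (PySem.List.sorted d (fun item => item.1) false)
      (fun item => item.2) true).Pairwise pvR := by
    rw [PySem.List.sorted_rev_eq_foldl_insertBy]
    exact foldl_insertBy_pairwise_A _ []
      (PySem.List.sorted_pairwise d (fun item => item.1)) List.Pairwise.nil (by simp)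
  have hperm : (PySem.List.sorted (PySem.List.sorted d (fun item => item.1) false)
      (fun item => item.2) true).Perm (pvBpairs d) :=
    ((PySem.List.sorted_perm _ _ _).trans (PySem.List.sorted_perm _ _ _)).trans
      (pvBpairs_perm d).symm
  exact List.Perm.eq_of_pairwise (fun a b _ _ hab hba => pvR_antisymm hab hba)
    hA (pvBpairs_pairwise d) hperm

theorem pvBpairs_map_fst (d : List (String × Int)) :
    (pvBpairs d).map (fun p => p.1)
      = (pvVs d).flatMap (fun v => PySem.List.sorted (pvGroup d v) (fun k => k) false) := by
  rw [pvBpairs, List.map_flatMap]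
  simp [List.map_map, Function.comp_def]

-- ===== VERDICT (by name: the statement is the Claim_ definition above) =====
theorem num_map_to_sorted_list_spec : Claim_equal_num_map_to_sorted_list := by
  intro d _
  show _ = _
  unfold num_map_to_sorted_list num_map_to_sorted_list_alt
  simp only [PySem.List.foldl_append_singleton_eq_map, List.nil_append,
    pv_buckets_keys, pv_buckets_getD]
  rw [PySem.List.foldl_append_eq_flatMap
    (g := fun v => PySem.List.sorted (pvGroup d v) (fun k => k) false), List.nil_append]
  rw [pv_zip_fst_snd d, pv_main d, pvBpairs_map_fst d]
  rfl
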